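-- pv_equiv track=rewrite | github.com/deadkey/adventofcode | aoc23/D11/d11.py | offscols
-- ===== SOURCE A (Python) =====
-- def offscols(a, b, cols):
--     start = min(a[1], b[1])
--     end = max(a[1], b[1])
--     d = end- start
--     for c in range(start, end + 1):
--         if c in cols:
--             d += 1000000-1
--     return d
-- ===== SOURCE B (Python) =====
-- def offscols(a, b, cols):
--     start = min(a[1], b[1])
--     end = max(a[1], b[1])
--     return end - start + (1000000 - 1) * len({c for c in cols if start <= c <= end})
-- ===== Notes on version B (the rewrite author's own statement) =====
-- stated objective: alternative
-- what changed: B drops A's loop over every integer in [start,end] with a list-membership test inside, and instead makes one pass over cols collecting the distinct column values lying in the interval, multiplying their count by the expansion weight.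
import Mathlib
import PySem

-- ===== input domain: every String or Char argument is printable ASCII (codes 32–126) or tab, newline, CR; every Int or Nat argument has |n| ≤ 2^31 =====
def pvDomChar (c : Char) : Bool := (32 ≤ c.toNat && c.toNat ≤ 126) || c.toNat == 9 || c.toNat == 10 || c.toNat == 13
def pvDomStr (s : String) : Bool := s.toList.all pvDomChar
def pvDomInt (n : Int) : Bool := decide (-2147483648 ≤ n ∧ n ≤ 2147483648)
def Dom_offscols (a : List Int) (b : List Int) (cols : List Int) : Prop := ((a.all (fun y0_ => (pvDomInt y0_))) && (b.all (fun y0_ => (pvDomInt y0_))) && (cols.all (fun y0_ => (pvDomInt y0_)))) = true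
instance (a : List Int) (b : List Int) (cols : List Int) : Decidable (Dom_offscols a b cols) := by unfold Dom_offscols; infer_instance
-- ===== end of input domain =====

-- B replaces A's scan of every integer in [start,end] by one pass over cols counting the
-- distinct column values inside the interval; objective: alternative (single pass over cols).

-- ===== PORT A =====
def offscols (a : List Int) (b : List Int) (cols : List Int) : Int :=
  match PySem.List.pyGet? a 1, PySem.List.pyGet? b 1 with
  | some a1, some b1 =>
    let start := min a1 b1
    let e := max a1 b1
    let d := e - start
    (PySem.List.pyRange start (e + 1) 1).foldl
      (fun d c => if c ∈ cols then d + (1000000 - 1) else d) d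
  | _, _ => 0   -- IndexError in Python; excluded by Pre_offscols

-- ===== PORT B =====
def offscols_alt (a : List Int) (b : List Int) (cols : List Int) : Int :=
  -- a[1]/b[1]: IndexError in Python when absent; those inputs are excluded by Pre_offscols
  let a1 := (PySem.List.pyGet? a 1).getD 0
  let b1 := (PySem.List.pyGet? b 1).getD 0
  let start := min a1 b1
  let e := max a1 b1
  e - start + (1000000 - 1) *
    ((PySem.Set.ofList (cols.filter (fun c => start ≤ c && c ≤ e))).length : Int)

-- ===== PRECONDITION & SPEC =====
-- Python raises IndexError on a[1]/b[1] when a list has fewer than two elements.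
def Pre_offscols (a : List Int) (b : List Int) (cols : List Int) : Prop :=
  2 ≤ a.length ∧ 2 ≤ b.length
instance (a : List Int) (b : List Int) (cols : List Int) : Decidable (Pre_offscols a b cols) := by unfold Pre_offscols; infer_instance
def pvWitness_offscols : List Int × List Int × List Int := ([0, 3], [1, 9], [4, 7, 7, 20])
def Spec_offscols (a : List Int) (b : List Int) (cols : List Int) (out : Int) : Prop := out = offscols_alt a b cols
instance (a : List Int) (b : List Int) (cols : List Int) (out : Int) : Decidable (Spec_offscols a b cols out) := by unfold Spec_offscols; infer_instance

-- ===== CLAIM (what is proved, stated in full; the proofs are below) =====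
def Claim_equal_offscols : Prop := ∀ (a : List Int) (b : List Int) (cols : List Int), Dom_offscols a b cols → Pre_offscols a b cols → Spec_offscols a b cols (offscols a b cols)

-- ===== LEMMAS AND PROOFS =====

-- A's loop adds the weight once for each range element that is in cols.
lemma foldl_weight (cols l : List Int) (d k : Int) :
    l.foldl (fun d c => if c ∈ cols then d + k else d) d
      = d + k * ((l.filter (fun c => decide (c ∈ cols))).length : Int) := by
  induction l generalizing d with
  | nil => simp
  | cons x t ih =>
    simp only [List.foldl_cons, List.filter_cons]
    by_cases h : x ∈ cols
    · simp only [h, if_pos, decide_true]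
      rw [ih, List.length_cons]
      push_cast
      ring
    · simp [h, ih]

-- The range elements that are in cols and the distinct cols elements in the interval
-- are two duplicate-free lists with the same members, hence the same length.
lemma count_eq (cols : List Int) (s e : Int) :
    ((PySem.List.pyRange s (e + 1) 1).filter (fun c => decide (c ∈ cols))).length
      = (PySem.Set.ofList (cols.filter (fun c => s ≤ c && c ≤ e))).length := by
  apply List.Perm.length_eq
  rw [List.perm_ext_iff_of_nodup
      (List.Nodup.filter _ (PySem.List.nodup_pyRange_one s (e + 1)))
      (PySem.Set.nodup_ofList _)]
  intro x
  simp [PySem.Set.mem_ofList, List.mem_filter, PySem.List.mem_pyRange_one]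
  constructor
  · rintro ⟨⟨h1, h2⟩, h3⟩; exact ⟨h3, h1, by omega⟩
  · rintro ⟨h1, h2, h3⟩; exact ⟨⟨h2, by omega⟩, h1⟩

-- ===== VERDICT (by name: the statement is the Claim_ definition above) =====
theorem offscols_spec : Claim_equal_offscols := by
  intro a b cols _ hpre
  obtain ⟨ha, hb⟩ := hpre
  match a, b with
  | a0 :: a1 :: arest, b0 :: b1 :: brest =>
    have hga : PySem.List.pyGet? (a0 :: a1 :: arest) (1 : Int) = some a1 := by
      simp [PySem.List.pyGet?, PySem.List.pyIdx?]
    have hgb : PySem.List.pyGet? (b0 :: b1 :: brest) (1 : Int) = some b1 := by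
      simp [PySem.List.pyGet?, PySem.List.pyIdx?]
    unfold Spec_offscols offscols offscols_alt
    rw [hga, hgb]
    simp only [Option.getD_some]
    rw [foldl_weight, count_eq]
    norm_num
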